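-- pv_equiv track=rewrite | github.com/pedrodemaia/Google-Foobar | Level 3/2 - queue.py | solution
-- ===== SOURCE A (Python) =====
-- def solution(start, length):
--     # Your code here
--
--     # return xor from 1 to n
--     def getXOR(n):
--         return [n, 1, n+1, 0][n%4]
--
--     result = 0
--     for i in range(length):
--         # get first and last workers of current line
--         initial = start + i*length
--         final = start + (i+1)*length - i - 1
--
--         # xor for numbers [lower,upper] equals xor([1,lower-1],[1,upper])
--         result ^= getXOR(initial-1) ^ getXOR(final)
--
--     return result
-- ===== SOURCE B (Python) =====
-- def solution(start, length):
--     # Pairing argument per row: in each row [lo, hi], strip an odd head and an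
--     # even tail; what remains splits into (even, odd) pairs, each XORing to 1,
--     # so the row XOR is head ^ tail ^ (1 if the number of pairs is odd).
--     result = 0
--     for i in range(length):
--         lo = start + i * length
--         result ^= _xor_range(lo, lo + (length - i) - 1)
--     return result
--
-- def _xor_range(lo, hi):
--     # XOR of all integers in [lo, hi] (assumes lo <= hi)
--     res = 0
--     if lo % 2 == 1:
--         res ^= lo
--         lo += 1
--     if hi % 2 == 0:
--         res ^= hi
--         hi -= 1
--     if lo <= hi and ((hi + 1 - lo) // 2) % 2 == 1:
--         res ^= 1
--     return res
-- ===== Notes on version B (the rewrite author's own statement) =====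
-- stated objective: alternative
-- what changed: B drops A's mod-4 prefix-XOR table (getXOR) and computes each row's XOR by a parity-pairing argument: strip an odd head and an even tail, then the remaining consecutive (even, odd) pairs each XOR to 1, so only the pair-count parity matters.
import Mathlib
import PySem

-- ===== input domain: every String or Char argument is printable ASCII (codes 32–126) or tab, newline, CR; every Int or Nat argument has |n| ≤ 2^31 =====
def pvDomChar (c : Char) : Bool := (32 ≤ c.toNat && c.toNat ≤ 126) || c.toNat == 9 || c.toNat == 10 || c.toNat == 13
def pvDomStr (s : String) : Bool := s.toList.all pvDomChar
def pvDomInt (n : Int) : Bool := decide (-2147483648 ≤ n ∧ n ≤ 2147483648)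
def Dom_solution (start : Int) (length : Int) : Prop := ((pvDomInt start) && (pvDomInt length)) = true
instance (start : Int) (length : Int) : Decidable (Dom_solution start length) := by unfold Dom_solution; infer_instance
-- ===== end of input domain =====

-- B replaces A's per-row mod-4 prefix-XOR table (getXOR) by a parity-pairing
-- computation of each row's XOR (strip odd head / even tail, pairs XOR to 1).

-- ===== PORT A =====
-- getXOR(n) = [n, 1, n+1, 0][n % 4]
def pyGetXOR (n : Int) : Int :=
  PySem.List.pyGetD [n, 1, n + 1, 0] (PySem.Int.mod n 4) 0

def solution (start : Int) (length : Int) : Int :=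
  (PySem.List.pyRange 0 length 1).foldl (fun result i =>
    let initial := start + i * length
    let final := start + (i + 1) * length - i - 1
    PySem.Int.bxor result (PySem.Int.bxor (pyGetXOR (initial - 1)) (pyGetXOR final))) 0

-- ===== PORT B =====
-- _xor_range(lo, hi): XOR of all integers in [lo, hi]
def xorRange (lo hi : Int) : Int :=
  let res : Int := 0
  let (res, lo) := if PySem.Int.mod lo 2 = 1 then (PySem.Int.bxor res lo, lo + 1) else (res, lo)
  let (res, hi) := if PySem.Int.mod hi 2 = 0 then (PySem.Int.bxor res hi, hi - 1) else (res, hi)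
  if lo ≤ hi ∧ PySem.Int.mod (PySem.Int.floordiv (hi + 1 - lo) 2) 2 = 1 then
    PySem.Int.bxor res 1
  else res

def solution_alt (start : Int) (length : Int) : Int :=
  (PySem.List.pyRange 0 length 1).foldl (fun result i =>
    let lo := start + i * length
    PySem.Int.bxor result (xorRange lo (lo + (length - i) - 1))) 0

-- ===== PRECONDITION & SPEC =====
def Spec_solution (start : Int) (length : Int) (out : Int) : Prop := out = solution_alt start length
instance (start : Int) (length : Int) (out : Int) : Decidable (Spec_solution start length out) := by unfold Spec_solution; infer_instance

-- ===== CLAIM (what is proved, stated in full; the proofs are below) =====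
def Claim_equal_solution : Prop := ∀ (start : Int) (length : Int), Dom_solution start length → Spec_solution start length (solution start length)

-- ===== LEMMAS AND PROOFS =====

-- canonical forms of Python xor on a negative argument (the nonneg/nonneg case is PySem.Int.bxor_natCast)
lemma bxor_nat_neg (m n : Nat) : PySem.Int.bxor (↑m) (-↑n - 1) = -↑(m ^^^ n) - 1 := by
  unfold PySem.Int.bxor
  rw [if_pos (by omega), if_neg (by omega)]
  have h1 : (-(-(↑n : Int) - 1) - 1) = ↑n := by ring
  rw [h1]
  simp

lemma bxor_neg_nat (m n : Nat) : PySem.Int.bxor (-↑m - 1) (↑n) = -↑(m ^^^ n) - 1 := by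
  unfold PySem.Int.bxor
  rw [if_neg (by omega), if_pos (by omega)]
  have h1 : (-(-(↑m : Int) - 1) - 1) = ↑m := by ring
  rw [h1]
  simp

lemma bxor_neg_neg (m n : Nat) : PySem.Int.bxor (-↑m - 1) (-↑n - 1) = ↑(m ^^^ n) := by
  unfold PySem.Int.bxor
  rw [if_neg (by omega), if_neg (by omega)]
  have h1 : (-(-(↑m : Int) - 1) - 1) = ↑m := by ring
  have h2 : (-(-(↑n : Int) - 1) - 1) = ↑n := by ring
  rw [h1, h2]
  simp

-- every Int is ↑m or -↑m - 1
lemma int_canon (a : Int) : (∃ m : Nat, a = ↑m) ∨ (∃ m : Nat, a = -↑m - 1) := by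
  rcases le_or_gt 0 a with h | h
  · exact Or.inl ⟨a.toNat, by omega⟩
  · exact Or.inr ⟨(-a - 1).toNat, by omega⟩

lemma bxor_assoc (a b c : Int) :
    PySem.Int.bxor (PySem.Int.bxor a b) c = PySem.Int.bxor a (PySem.Int.bxor b c) := by
  rcases int_canon a with ⟨m, rfl⟩ | ⟨m, rfl⟩ <;>
    rcases int_canon b with ⟨n, rfl⟩ | ⟨n, rfl⟩ <;>
      rcases int_canon c with ⟨k, rfl⟩ | ⟨k, rfl⟩ <;>
        simp [bxor_nat_neg, bxor_neg_nat, bxor_neg_neg, Nat.xor_assoc]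

lemma zero_bxor (a : Int) : PySem.Int.bxor 0 a = a := by
  rw [PySem.Int.bxor_comm]; exact PySem.Int.bxor_zero a

-- Python m ^ 1 = m + 1 for even m
lemma bxor_one_of_even (m : Int) (h : m % 2 = 0) : PySem.Int.bxor m 1 = m + 1 := by
  rcases int_canon m with ⟨k, rfl⟩ | ⟨k, rfl⟩
  · have hk : Even k := Nat.even_iff.mpr (by omega)
    have h1 : PySem.Int.bxor (↑k) 1 = ↑(k ^^^ 1) := by
      simpa using PySem.Int.bxor_natCast k 1
    rw [h1, Nat.xor_one_of_even hk]
    push_cast; ring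
  · have hk : Odd k := Nat.odd_iff.mpr (by omega)
    have h1 : PySem.Int.bxor (-↑k - 1) 1 = -↑(k ^^^ 1) - 1 := by
      simpa using bxor_neg_nat k 1
    rw [h1, Nat.xor_one_of_odd hk]
    rcases hk with ⟨t, ht⟩
    subst ht; push_cast; ring

-- a consecutive (even, odd) pair XORs to 1
lemma bxor_pair (b : Int) (h : b % 2 = 0) : PySem.Int.bxor b (b + 1) = 1 := by
  have h1 : b + 1 = PySem.Int.bxor b 1 := (bxor_one_of_even b h).symm
  rw [h1, ← bxor_assoc, PySem.Int.bxor_self, zero_bxor]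

-- the prefix-XOR step: getXOR(n) = getXOR(n-1) ^ n
lemma getXOR_step (n : Int) : pyGetXOR n = PySem.Int.bxor (pyGetXOR (n - 1)) n := by
  have h4 : n % 4 = 0 ∨ n % 4 = 1 ∨ n % 4 = 2 ∨ n % 4 = 3 := by omega
  rcases h4 with h | h | h | h
  · have h' : (n - 1) % 4 = 3 := by omega
    simp [pyGetXOR, h, h', PySem.List.pyGetD, PySem.List.pyGet?, PySem.List.pyIdx?,
      zero_bxor]
  · have h' : (n - 1) % 4 = 0 := by omega
    have heven : (n - 1) % 2 = 0 := by omega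
    have hx : PySem.Int.bxor (n - 1) n = 1 := by
      have := bxor_pair (n - 1) heven
      rwa [show n - 1 + 1 = n by ring] at this
    simp [pyGetXOR, h, h', PySem.List.pyGetD, PySem.List.pyGet?, PySem.List.pyIdx?, hx]
  · have h' : (n - 1) % 4 = 1 := by omega
    have heven : n % 2 = 0 := by omega
    simp [pyGetXOR, h, h', PySem.List.pyGetD, PySem.List.pyGet?, PySem.List.pyIdx?]
    rw [PySem.Int.bxor_comm, bxor_one_of_even _ heven]
  · have h' : (n - 1) % 4 = 2 := by omega
    simp [pyGetXOR, h, h', PySem.List.pyGetD, PySem.List.pyGet?, PySem.List.pyIdx?,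
      PySem.Int.bxor_self]

-- the XOR of the m consecutive integers starting at a (proof-side reference object)
def refRow (a : Int) (m : Nat) : Int :=
  (List.range m).foldl (fun acc j => PySem.Int.bxor acc (a + ↑j)) 0

-- A's row term is refRow
lemma row_closed (a : Int) (m : Nat) :
    refRow a m = PySem.Int.bxor (pyGetXOR (a - 1)) (pyGetXOR (a - 1 + ↑m)) := by
  induction m with
  | zero => simp [refRow, PySem.Int.bxor_self]
  | succ k ih =>
    rw [refRow, List.range_succ, List.foldl_append, ← refRow, ih]
    simp only [List.foldl_cons, List.foldl_nil]
    have hstep : pyGetXOR (a - 1 + ↑(k + 1)) = PySem.Int.bxor (pyGetXOR (a - 1 + ↑k)) (a + ↑k) := by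
      have := getXOR_step (a + ↑k)
      rw [show a - 1 + (↑(k + 1) : Int) = a + ↑k by push_cast; ring, this,
        show a + ↑k - 1 = a - 1 + ↑k by ring]
    rw [hstep, bxor_assoc]

-- unfolding xorRange into its four parity branches, with % and / in omega's dialect
lemma xorRange_cases (lo hi : Int) :
    xorRange lo hi =
      if lo % 2 = 1 then
        if hi % 2 = 0 then
          if lo + 1 ≤ hi - 1 ∧ ((hi - 1 + 1 - (lo + 1)) / 2) % 2 = 1
          then PySem.Int.bxor (PySem.Int.bxor (PySem.Int.bxor 0 lo) hi) 1
          else PySem.Int.bxor (PySem.Int.bxor 0 lo) hi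
        else
          if lo + 1 ≤ hi ∧ ((hi + 1 - (lo + 1)) / 2) % 2 = 1
          then PySem.Int.bxor (PySem.Int.bxor 0 lo) 1
          else PySem.Int.bxor 0 lo
      else
        if hi % 2 = 0 then
          if lo ≤ hi - 1 ∧ ((hi - 1 + 1 - lo) / 2) % 2 = 1
          then PySem.Int.bxor (PySem.Int.bxor 0 hi) 1
          else PySem.Int.bxor 0 hi
        else
          if lo ≤ hi ∧ ((hi + 1 - lo) / 2) % 2 = 1
          then PySem.Int.bxor 0 1
          else 0 := by
  unfold xorRange
  rw [PySem.Int.mod_eq_emod_of_pos (a := lo) (by omega),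
    PySem.Int.mod_eq_emod_of_pos (a := hi) (by omega)]
  by_cases h1 : lo % 2 = 1 <;> by_cases h2 : hi % 2 = 0 <;>
    simp only [h1, h2, if_true, if_false] <;>
    rw [PySem.Int.mod_eq_emod_of_pos (by omega), PySem.Int.floordiv_eq_ediv_of_pos (by omega)]

-- Python m ^ 1 = m - 1 for odd m
lemma bxor_one_of_odd (m : Int) (h : m % 2 = 1) : PySem.Int.bxor m 1 = m - 1 := by
  have he := bxor_one_of_even (m - 1) (by omega)
  rw [show m - 1 + 1 = m by ring] at he
  have h2 : PySem.Int.bxor (PySem.Int.bxor (m - 1) 1) 1 = m - 1 := by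
    rw [bxor_assoc, PySem.Int.bxor_self, PySem.Int.bxor_zero]
  rw [he] at h2
  exact h2

-- cancelling a stripped pair: ((x ^ b) ^ 1) ^ (b+1) = x for even b
lemma bxor_cancel_pair (x b : Int) (h : b % 2 = 0) :
    PySem.Int.bxor (PySem.Int.bxor (PySem.Int.bxor x b) 1) (b + 1) = x := by
  rw [bxor_assoc (PySem.Int.bxor x b) 1 (b + 1), PySem.Int.bxor_comm 1 (b + 1),
    bxor_one_of_odd (b + 1) (by omega), show b + 1 - 1 = b by ring,
    bxor_assoc, PySem.Int.bxor_self, PySem.Int.bxor_zero]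

-- the one-element range
lemma xorRange_self (a : Int) : xorRange a a = a := by
  rw [xorRange_cases]
  rcases Int.emod_two_eq a with h | h
  · simp only [if_neg (show ¬(a % 2 = 1) by omega), if_pos (show a % 2 = 0 by omega),
      if_neg (show ¬(a ≤ a - 1 ∧ ((a - 1 + 1 - a) / 2) % 2 = 1) by omega), zero_bxor]
  · simp only [if_pos (show a % 2 = 1 by omega), if_neg (show ¬(a % 2 = 0) by omega),
      if_neg (show ¬(a + 1 ≤ a ∧ ((a + 1 - (a + 1)) / 2) % 2 = 1) by omega), zero_bxor]

-- extending the range on top by one element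
lemma xorRange_step (a b : Int) (hab : a ≤ b) :
    xorRange a (b + 1) = PySem.Int.bxor (xorRange a b) (b + 1) := by
  rw [xorRange_cases, xorRange_cases]
  rcases Int.emod_two_eq a with ha | ha <;> rcases Int.emod_two_eq b with hb | hb
  · -- a even, b even
    simp only [if_neg (show ¬(a % 2 = 1) by omega), if_neg (show ¬((b + 1) % 2 = 0) by omega),
      if_pos (show b % 2 = 0 by omega)]
    by_cases hc : a ≤ b - 1 ∧ ((b - 1 + 1 - a) / 2) % 2 = 1
    · simp only [if_pos hc,
        if_neg (show ¬(a ≤ b + 1 ∧ ((b + 1 + 1 - a) / 2) % 2 = 1) by omega), zero_bxor]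
      rw [bxor_one_of_even b hb]
      exact (PySem.Int.bxor_self (b + 1)).symm
    · simp only [if_neg hc,
        if_pos (show a ≤ b + 1 ∧ ((b + 1 + 1 - a) / 2) % 2 = 1 by omega), zero_bxor]
      exact (bxor_pair b hb).symm
  · -- a even, b odd
    simp only [if_neg (show ¬(a % 2 = 1) by omega), if_pos (show (b + 1) % 2 = 0 by omega),
      if_neg (show ¬(b % 2 = 0) by omega)]
    by_cases hc : a ≤ b ∧ ((b + 1 - a) / 2) % 2 = 1
    · simp only [if_pos hc,
        if_pos (show a ≤ b + 1 - 1 ∧ ((b + 1 - 1 + 1 - a) / 2) % 2 = 1 by omega), zero_bxor]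
      exact PySem.Int.bxor_comm (b + 1) 1
    · simp only [if_neg hc,
        if_neg (show ¬(a ≤ b + 1 - 1 ∧ ((b + 1 - 1 + 1 - a) / 2) % 2 = 1) by omega), zero_bxor]
  · -- a odd, b even
    simp only [if_pos (show a % 2 = 1 by omega), if_neg (show ¬((b + 1) % 2 = 0) by omega),
      if_pos (show b % 2 = 0 by omega)]
    by_cases hc : a + 1 ≤ b - 1 ∧ ((b - 1 + 1 - (a + 1)) / 2) % 2 = 1
    · simp only [if_pos hc,
        if_neg (show ¬(a + 1 ≤ b + 1 ∧ ((b + 1 + 1 - (a + 1)) / 2) % 2 = 1) by omega), zero_bxor]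
      exact (bxor_cancel_pair a b hb).symm
    · simp only [if_neg hc,
        if_pos (show a + 1 ≤ b + 1 ∧ ((b + 1 + 1 - (a + 1)) / 2) % 2 = 1 by omega), zero_bxor]
      rw [bxor_assoc, bxor_pair b hb]
  · -- a odd, b odd
    simp only [if_pos (show a % 2 = 1 by omega), if_pos (show (b + 1) % 2 = 0 by omega),
      if_neg (show ¬(b % 2 = 0) by omega)]
    by_cases hc : a + 1 ≤ b ∧ ((b + 1 - (a + 1)) / 2) % 2 = 1
    · simp only [if_pos hc,
        if_pos (show a + 1 ≤ b + 1 - 1 ∧ ((b + 1 - 1 + 1 - (a + 1)) / 2) % 2 = 1 by omega),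
        zero_bxor]
      rw [bxor_assoc, bxor_assoc, PySem.Int.bxor_comm (b + 1) 1]
    · simp only [if_neg hc,
        if_neg (show ¬(a + 1 ≤ b + 1 - 1 ∧ ((b + 1 - 1 + 1 - (a + 1)) / 2) % 2 = 1) by omega),
        zero_bxor]

-- B's row term is refRow
lemma xorRange_eq_refRow (m : Nat) (a : Int) : xorRange a (a + ↑m) = refRow a (m + 1) := by
  induction m with
  | zero => simp [xorRange_self, refRow, zero_bxor]
  | succ k ih =>
    have hcast : (↑(k + 1) : Int) = ↑k + 1 := by push_cast; ring
    have h2 : refRow a (k + 1 + 1) = PySem.Int.bxor (refRow a (k + 1)) (a + ↑(k + 1)) := by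
      rw [refRow, List.range_succ, List.foldl_append, ← refRow]
      simp only [List.foldl_cons, List.foldl_nil]
    rw [hcast, ← add_assoc, xorRange_step a (a + ↑k) (by omega), ih, h2, hcast, ← add_assoc]

-- ===== VERDICT (by name: the statement is the Claim_ definition above) =====
theorem solution_spec : Claim_equal_solution := by
  intro start length _
  unfold Spec_solution solution solution_alt
  apply PySem.List.foldl_congr_mem
  intro r i hi
  have hmem : 0 ≤ i ∧ i < length := PySem.List.mem_pyRange_one.mp hi
  dsimp only
  have h1 : 1 ≤ (length - i).toNat := by omega
  have hm : (↑(length - i).toNat : Int) = length - i := by omega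
  have hrow : start + i * length + (length - i) - 1
      = start + i * length + ↑((length - i).toNat - 1) := by omega
  rw [hrow, xorRange_eq_refRow, Nat.sub_add_cancel h1, row_closed]
  have harg : start + i * length - 1 + ↑(length - i).toNat = start + (i + 1) * length - i - 1 := by
    rw [hm]; ring
  rw [harg]
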